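-- pv_equiv track=rewrite | github.com/RedRem95/AoC2019 | helper.py | atleast_one_pair_check
-- ===== SOURCE A (Python) =====
-- from typing import Union, List, Iterable
--
-- def atleast_one_pair_check(pw: List[int]):
--     i = 0
--     while i < len(pw):
--         sames = 0
--         for j in range(i + 1, len(pw), 1):
--             if pw[i] == pw[j]:
--                 sames += 1
--             else:
--                 break
--         if sames == 1:
--             return True
--         i += sames + 1
--     return False
-- ===== SOURCE B (Python) =====
-- def _isolated_pair_at(pw, i):
--     # position i starts an isolated pair iff pw[i]==pw[i+1], the value differs
--     # from its left neighbour (or i is the start) and from its right neighbour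
--     # (or the pair ends the list)
--     return (pw[i] == pw[i + 1]
--             and (i == 0 or pw[i - 1] != pw[i])
--             and (i + 2 == len(pw) or pw[i + 2] != pw[i + 1]))
--
-- def atleast_one_pair_check(pw):
--     return any(_isolated_pair_at(pw, i) for i in range(len(pw) - 1))
-- ===== Notes on version B (the rewrite author's own statement) =====
-- stated objective: alternative
-- what changed: Replaces A's stateful run-scanning walk (inner neighbour-counting loop plus index jumps) by a stateless per-index window predicate: any position i where pw[i]==pw[i+1] and both boundary neighbours differ.
import Mathlib
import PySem

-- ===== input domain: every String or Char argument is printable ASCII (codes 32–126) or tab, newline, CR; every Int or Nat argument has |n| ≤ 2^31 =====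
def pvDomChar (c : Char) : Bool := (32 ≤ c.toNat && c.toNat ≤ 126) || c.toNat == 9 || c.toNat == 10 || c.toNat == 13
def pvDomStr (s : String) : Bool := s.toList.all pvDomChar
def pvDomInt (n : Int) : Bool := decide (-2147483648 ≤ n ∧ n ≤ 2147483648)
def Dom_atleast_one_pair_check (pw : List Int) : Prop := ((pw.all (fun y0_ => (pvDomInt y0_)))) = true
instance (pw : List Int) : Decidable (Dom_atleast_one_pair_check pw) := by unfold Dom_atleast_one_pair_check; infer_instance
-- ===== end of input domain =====

-- B replaces A's stateful run-scanning walk by a stateless per-index window test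
-- (is i the start of an isolated pair?) over all positions (alternative decomposition; same cost).
-- ===== PORT A =====
-- inner `for j in range(i+1, len(pw))` loop: counts equal neighbours, breaks on mismatch
def pvInnerFor (pw : List Int) (v : Int) (j : Nat) (sames : Nat) : Nat :=
  if h : j < pw.length then
    if pw[j] == v then pvInnerFor pw v (j + 1) (sames + 1) else sames
  else sames
termination_by pw.length - j

-- the `while i < len(pw)` loop
def pvWhile (pw : List Int) (i : Nat) : Bool :=
  if h : i < pw.length then
    let sames := pvInnerFor pw pw[i] (i + 1) 0
    if sames == 1 then true
    else pvWhile pw (i + sames + 1)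
  else false
termination_by pw.length - i
decreasing_by omega

def atleast_one_pair_check (pw : List Int) : Bool := pvWhile pw 0

-- ===== PORT B =====
-- `_isolated_pair_at(pw, i)` from Source B; every index Python actually reads is in range
-- thanks to the short-circuit order, so `getD _ 0` is exact here
def pvIsolatedPairAt (pw : List Int) (i : Nat) : Bool :=
  (pw.getD i 0 == pw.getD (i + 1) 0)
    && (i == 0 || pw.getD (i - 1) 0 != pw.getD i 0)
    && (i + 2 == pw.length || pw.getD (i + 2) 0 != pw.getD (i + 1) 0)

def atleast_one_pair_check_alt (pw : List Int) : Bool :=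
  (List.range (pw.length - 1)).any (fun i => pvIsolatedPairAt pw i)

-- ===== PRECONDITION & SPEC =====
def Spec_atleast_one_pair_check (pw : List Int) (out : Bool) : Prop := out = atleast_one_pair_check_alt pw
instance (pw : List Int) (out : Bool) : Decidable (Spec_atleast_one_pair_check pw out) := by unfold Spec_atleast_one_pair_check; infer_instance

-- ===== CLAIM (what is proved, stated in full; the proofs are below) =====
def Claim_equal_atleast_one_pair_check : Prop := ∀ (pw : List Int), Dom_atleast_one_pair_check pw → Spec_atleast_one_pair_check pw (atleast_one_pair_check pw)

-- ===== LEMMAS AND PROOFS =====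

-- `i` is the start of a maximal run (or past the end): pvWhile's loop invariant
def pvRS (pw : List Int) (i : Nat) : Prop :=
  i = 0 ∨ (i ≤ pw.length ∧ (i = pw.length ∨ pw.getD (i - 1) 0 ≠ pw.getD i 0))

lemma pvGetD_eq (pw : List Int) (i : Nat) (h : i < pw.length) : pw.getD i 0 = pw[i] := by
  simp [List.getD_eq_getElem?_getD, List.getElem?_eq_getElem h]

-- pvInnerFor counts the block of values equal to v starting at j
lemma pvInnerFor_spec (pw : List Int) (v : Int) : ∀ j s, j ≤ pw.length → ∃ k,
    pvInnerFor pw v j s = s + k ∧ j + k ≤ pw.length ∧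
    (∀ m, m < k → pw.getD (j + m) 0 = v) ∧
    (j + k < pw.length → pw.getD (j + k) 0 ≠ v) := by
  intro j s
  induction hn : pw.length - j using Nat.strong_induction_on generalizing j s with
  | _ n ih =>
    intro hj
    rw [pvInnerFor]
    by_cases h : j < pw.length
    · rw [dif_pos h]
      by_cases hv : (pw[j] == v) = true
      · rw [if_pos hv]
        obtain ⟨k, h1, h2, h3, h4⟩ := ih (pw.length - (j + 1)) (by omega) (j + 1) (s + 1) rfl (by omega)
        refine ⟨k + 1, by omega, by omega, ?_, ?_⟩
        · intro m hm
          cases m with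
          | zero => rw [Nat.add_zero, pvGetD_eq pw j h]; exact beq_iff_eq.mp hv
          | succ m' => have := h3 m' (by omega); simpa [Nat.add_comm, Nat.add_left_comm] using this
        · intro hlt
          have := h4 (by omega)
          simpa [Nat.add_comm, Nat.add_left_comm] using this
      · rw [if_neg hv]
        refine ⟨0, rfl, by omega, by omega, ?_⟩
        intro _
        simp only [Nat.add_zero, pvGetD_eq pw j h]
        simpa using hv
    · rw [dif_neg h]
      refine ⟨0, rfl, by omega, ?_, ?_⟩
      · intro m hm; exact absurd hm (by omega)
      · intro hlt; exact absurd hlt (by simpa using h)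

lemma pvMain (pw : List Int) : ∀ i, pvRS pw i →
    (pvWhile pw i = true ↔ ∃ j, i ≤ j ∧ j + 1 < pw.length ∧ pvIsolatedPairAt pw j = true) := by
  intro i hrs
  induction hn : pw.length - i using Nat.strong_induction_on generalizing i with
  | _ n ih =>
    by_cases h : i < pw.length
    · obtain ⟨k, h1, h2, h3, h4⟩ := pvInnerFor_spec pw pw[i] (i + 1) 0 (by omega)
      simp only [Nat.zero_add] at h1
      have hstep : pvWhile pw i = if k == 1 then true else pvWhile pw (i + k + 1) := by
        rw [pvWhile]
        simp only [dif_pos h, h1]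
      -- values pw.getD m 0 for i ≤ m ≤ i+k all equal pw[i]
      have hall : ∀ m, i ≤ m → m ≤ i + k → pw.getD m 0 = pw[i] := by
        intro m hm1 hm2
        rcases Nat.eq_or_lt_of_le hm1 with rfl | hlt
        · exact pvGetD_eq pw _ h
        · have := h3 (m - (i + 1)) (by omega)
          rwa [show i + 1 + (m - (i + 1)) = m by omega] at this
      have hstop : i + 1 + k < pw.length → pw.getD (i + 1 + k) 0 ≠ pw[i] := h4
      have hgi : pw.getD i 0 = pw[i] := pvGetD_eq pw i h
      rw [hstep]
      by_cases hk : k = 1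
      · subst hk
        rw [if_pos (by decide : (((1:Nat) == 1) = true))]
        constructor
        · intro _
          refine ⟨i, le_refl i, by omega, ?_⟩
          unfold pvIsolatedPairAt
          have e1 : pw.getD (i + 1) 0 = pw[i] := hall (i + 1) (by omega) (by omega)
          refine (Bool.and_eq_true ..).mpr ⟨(Bool.and_eq_true ..).mpr ⟨?_, ?_⟩, ?_⟩
          · simp only [beq_iff_eq, hgi, e1]
          · rcases hrs with h0 | ⟨_, hb⟩
            · simp [h0]
            · rcases hb with hb | hb
              · omega
              · simp only [Bool.or_eq_true, beq_iff_eq, bne_iff_ne, ne_eq]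
                exact Or.inr hb
          · simp only [Bool.or_eq_true, beq_iff_eq, bne_iff_ne, ne_eq]
            by_cases hend : i + 2 = pw.length
            · exact Or.inl hend
            · refine Or.inr ?_
              have := hstop (by omega)
              rw [show i + 1 + 1 = i + 2 by omega] at this
              rw [e1]; exact this
        · intro _; rfl
      · rw [if_neg (by simp [hk])]
        have hrs' : pvRS pw (i + k + 1) := by
          by_cases hend : i + k + 1 = pw.length
          · exact Or.inr ⟨by omega, Or.inl hend⟩
          · refine Or.inr ⟨by omega, Or.inr ?_⟩
            have hlt : i + 1 + k < pw.length := by omega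
            have hne := hstop hlt
            have heq : pw.getD (i + k + 1 - 1) 0 = pw[i] := by
              rw [show i + k + 1 - 1 = i + k by omega]
              exact hall (i + k) (by omega) (by omega)
            rw [heq, show i + k + 1 = i + 1 + k by omega]
            exact fun hc => hne hc.symm
        rw [ih (pw.length - (i + k + 1)) (by omega) (i + k + 1) hrs' rfl]
        constructor
        · rintro ⟨j, hj1, hj2, hj3⟩; exact ⟨j, by omega, hj2, hj3⟩
        · rintro ⟨j, hj1, hj2, hj3⟩
          refine ⟨j, ?_, hj2, hj3⟩
          by_contra hc
          have hji : i ≤ j ∧ j ≤ i + k := by omega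
          unfold pvIsolatedPairAt at hj3
          rw [Bool.and_eq_true, Bool.and_eq_true] at hj3
          obtain ⟨⟨w1, w2⟩, w3⟩ := hj3
          rcases Nat.eq_or_lt_of_le hji.1 with rfl | hlt
          · -- j = i : contradict k = 0 or k ≥ 2
            rcases Nat.eq_zero_or_pos k with hk0 | hkpos
            · have hne := hstop (by omega)
              rw [hk0, Nat.add_zero] at hne
              simp only [beq_iff_eq, hgi] at w1
              exact hne w1.symm
            · have hk2 : 2 ≤ k := by omega
              simp only [Bool.or_eq_true, beq_iff_eq, bne_iff_ne, ne_eq] at w3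
              rcases w3 with w3 | w3
              · omega
              · have ea : pw.getD (i + 2) 0 = pw[i] := hall (i + 2) (by omega) (by omega)
                have eb : pw.getD (i + 1) 0 = pw[i] := hall (i + 1) (by omega) (by omega)
                rw [ea, eb] at w3
                exact w3 rfl
          · -- i < j ≤ i + k : j is mid-run, left neighbour equal
            simp only [Bool.or_eq_true, beq_iff_eq, bne_iff_ne, ne_eq] at w2
            rcases w2 with w2 | w2
            · omega
            · have ea : pw.getD (j - 1) 0 = pw[i] := hall (j - 1) (by omega) (by omega)
              have eb : pw.getD j 0 = pw[i] := hall j (by omega) (by omega)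
              rw [ea, eb] at w2
              exact w2 rfl
    · rw [pvWhile, dif_neg h]
      simp only [Bool.false_eq_true, false_iff]
      rintro ⟨j, hj1, hj2, _⟩
      omega

-- ===== VERDICT (by name: the statement is the Claim_ definition above) =====
theorem atleast_one_pair_check_spec : Claim_equal_atleast_one_pair_check := by
  intro pw _
  unfold Spec_atleast_one_pair_check atleast_one_pair_check atleast_one_pair_check_alt
  have hA := pvMain pw 0 (Or.inl rfl)
  have hB : ((List.range (pw.length - 1)).any (fun i => pvIsolatedPairAt pw i) = true)
      ↔ ∃ j, 0 ≤ j ∧ j + 1 < pw.length ∧ pvIsolatedPairAt pw j = true := by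
    simp only [List.any_eq_true, List.mem_range]
    constructor
    · rintro ⟨j, hj, hp⟩; exact ⟨j, by omega, by omega, hp⟩
    · rintro ⟨j, _, hj, hp⟩; exact ⟨j, by omega, hp⟩
  rw [Bool.eq_iff_iff, hA, hB]
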